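-- pv_equiv track=rewrite | github.com/chvmq/test-nicecode | meta_picture/services.py | _get_format_picture
-- ===== SOURCE A (Python) =====
-- def _get_format_picture(picture_name: str) -> str:
--     """Возвращает формат картинки"""
--     counter: int = 0
--     status: bool = False
--     for char in picture_name:
--         if char == '.':
--             status = True
--         if status:
--             counter += 1
--     return picture_name[len(picture_name) - counter + 1:]
-- ===== SOURCE B (Python) =====
-- def _get_format_picture(picture_name: str) -> str:
--     """Возвращает формат картинки"""
--     return picture_name.partition('.')[2]
-- ===== Notes on version B (the rewrite author's own statement) =====
-- stated objective: idiomatic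
-- what changed: Replaces the manual counter/status loop plus arithmetic slice with a single structural split on the first dot via str.partition, returning the after-separator part ('' when there is no dot).
import Mathlib
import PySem

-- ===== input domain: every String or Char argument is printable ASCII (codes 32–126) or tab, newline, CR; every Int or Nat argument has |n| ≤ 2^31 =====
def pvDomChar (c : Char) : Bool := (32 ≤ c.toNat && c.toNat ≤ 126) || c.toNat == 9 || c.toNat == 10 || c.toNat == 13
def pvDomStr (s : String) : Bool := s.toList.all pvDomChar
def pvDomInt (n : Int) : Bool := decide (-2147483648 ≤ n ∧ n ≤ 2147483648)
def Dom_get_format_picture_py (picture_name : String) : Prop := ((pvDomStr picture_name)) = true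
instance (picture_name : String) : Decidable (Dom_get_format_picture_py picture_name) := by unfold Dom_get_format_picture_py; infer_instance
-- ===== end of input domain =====

-- B replaces A's counter/status accumulator loop with a structural split on the first dot
-- (str.partition('.')[2]); same value on every input, same O(n) cost.


-- ===== PORT A =====
-- A's loop body on its state (counter, status): set status on '.', then count if status.
def pvStepA (acc : Int × Bool) (char : Char) : Int × Bool :=
  let status := if char = '.' then true else acc.2
  let counter := if status then acc.1 + 1 else acc.1
  (counter, status)

def get_format_picture_py (picture_name : String) : String :=
  PySem.Str.slice picture_name
    (some ((picture_name.toList.length : Int)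
           - (picture_name.toList.foldl pvStepA (0, false)).1 + 1)) none

-- ===== PORT B =====
-- Hand port of str.partition('.')[2] (no PySem primitive for partition): the exact
-- after-separator part of the split at the FIRST '.', '' when there is no '.'.
def pvPartAfterDot : List Char → Option (List Char)
  | [] => none
  | c :: cs => if c = '.' then some cs else pvPartAfterDot cs

def get_format_picture_py_alt (picture_name : String) : String :=
  match pvPartAfterDot picture_name.toList with
  | none => ""
  | some rest => String.ofList rest

-- ===== PRECONDITION & SPEC =====
def Spec_get_format_picture_py (picture_name : String) (out : String) : Prop := out = get_format_picture_py_alt picture_name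
instance (picture_name : String) (out : String) : Decidable (Spec_get_format_picture_py picture_name out) := by unfold Spec_get_format_picture_py; infer_instance

-- ===== CLAIM (what is proved, stated in full; the proofs are below) =====
def Claim_equal_get_format_picture_py : Prop := ∀ (picture_name : String), Dom_get_format_picture_py picture_name → Spec_get_format_picture_py picture_name (get_format_picture_py picture_name)

-- ===== LEMMAS AND PROOFS =====

-- once status is true, each remaining char adds one to the counter
theorem pv_foldl_true (cs : List Char) (c : Int) :
    cs.foldl pvStepA (c, true) = (c + cs.length, true) := by
  induction cs generalizing c with
  | nil => simp
  | cons x xs ih =>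
    have hstep : pvStepA (c, true) x = (c + 1, true) := by simp [pvStepA]
    rw [List.foldl_cons, hstep, ih]
    simp only [List.length_cons]
    congr 1
    push_cast
    ring

-- A's counter counts the first '.' and everything after it
theorem pv_counter_eq (cs : List Char) :
    (cs.foldl pvStepA (0, false)).1
    = (match pvPartAfterDot cs with
       | none => (0 : Int)
       | some rest => (rest.length : Int) + 1) := by
  induction cs with
  | nil => simp [pvPartAfterDot]
  | cons x xs ih =>
    by_cases hx : x = '.'
    · have hstep : pvStepA (0, false) x = (1, true) := by simp [pvStepA, hx]
      rw [List.foldl_cons, hstep, pv_foldl_true, pvPartAfterDot]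
      simp [hx]
      ring
    · have hstep : pvStepA (0, false) x = (0, false) := by simp [pvStepA, hx]
      rw [List.foldl_cons, hstep, pvPartAfterDot]
      simpa [hx] using ih

theorem pv_after_len (cs rest : List Char) (h : pvPartAfterDot cs = some rest) :
    rest.length < cs.length ∧ cs.drop (cs.length - rest.length) = rest := by
  induction cs with
  | nil => simp [pvPartAfterDot] at h
  | cons x xs ih =>
    by_cases hx : x = '.'
    · simp [pvPartAfterDot, hx] at h
      subst h
      exact ⟨by simp, by simp⟩
    · simp [pvPartAfterDot, hx] at h
      obtain ⟨hlt, hdrop⟩ := ih h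
      refine ⟨by simp; omega, ?_⟩
      have hlen : (x :: xs).length - rest.length = (xs.length - rest.length) + 1 := by
        simp; omega
      rw [hlen, List.drop_succ_cons, hdrop]

theorem pv_main (s : String) : get_format_picture_py s = get_format_picture_py_alt s := by
  unfold get_format_picture_py get_format_picture_py_alt
  rw [pv_counter_eq s.toList]
  cases h : pvPartAfterDot s.toList with
  | none =>
    have hc : ((s.toList.length : Int) - 0 + 1) = ((s.toList.length + 1 : Nat) : Int) := by
      push_cast; ring
    rw [hc]
    have hl : s.toList.length = s.length := by simp
    simp only [PySem.Str.slice, PySem.Chars.slice_eq_listSlice, PySem.List.slice_from_natCast]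
    simp [List.drop_eq_nil_iff]
  | some rest =>
    obtain ⟨hlt, hdrop⟩ := pv_after_len s.toList rest h
    have hc : ((s.toList.length : Int) - ((rest.length : Int) + 1) + 1)
        = ((s.toList.length - rest.length : Nat) : Int) := by
      push_cast [Nat.cast_sub (le_of_lt hlt)]; ring
    rw [hc]
    have hl : s.toList.length = s.length := by simp
    rw [hl] at hdrop
    simp [PySem.Str.slice, PySem.List.slice_from_natCast, hdrop]

-- ===== VERDICT (by name: the statement is the Claim_ definition above) =====
theorem get_format_picture_py_spec : Claim_equal_get_format_picture_py := by
  intro s _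
  exact pv_main s
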